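-- pv_equiv track=rewrite | github.com/AnshulPatil2005/soul-protocol | src/soul_protocol/spec/scope.py | match_scope
-- ===== SOURCE A (Python) =====
-- def match_scope(entity_scopes: list[str] | None, allowed_scopes: list[str] | None) -> bool:
--     """Return True when ``entity_scopes`` and ``allowed_scopes`` overlap
--     by hierarchical containment in either direction.
--
--     Empty ``entity_scopes`` is treated as "no scope assigned" — visible
--     to any caller. Empty ``allowed_scopes`` is treated as "caller has no
--     scope filter" — sees everything. This matches the lean default that
--     pre-scope memories continue to surface unchanged.
--
--     Bidirectional containment: a scope ``A`` is said to contain a scope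
--     ``B`` when either they are equal, or ``A`` is a glob ``"<prefix>:*"``
--     and ``B`` equals ``<prefix>`` or starts with ``<prefix>:``. The match
--     returns True when at least one pair ``(entity, allowed)`` has one
--     side contain the other.
--
--     Examples:
--         >>> match_scope(["org:sales:leads"], ["org:sales:*"])   # descendant in glob
--         True
--         >>> match_scope(["org:sales:*"], ["org:sales:leads"])   # caller inside glob entity
--         True
--         >>> match_scope(["org:sales:*"], ["org:*"])             # glob nested under broader glob
--         True
--         >>> match_scope(["org:sales:leads"], ["org:support:*"]) # different subtree
--         False
--         >>> match_scope(["org:sales:leads"], ["org:sales:leads"])  # exact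
--         True
--
--     Hierarchical glob syntax: ``"org:sales:*"`` matches any descendant
--     under ``org:sales`` and ``org:sales`` itself. ``"*"`` matches
--     anything. Comparison is case-sensitive — scope tags are namespaced
--     ASCII identifiers, not free-form labels.
--     """
--     if not entity_scopes:
--         return True
--     if not allowed_scopes:
--         return True
--     return any(
--         _contains(entity, allowed) or _contains(allowed, entity)
--         for entity in entity_scopes
--         for allowed in allowed_scopes
--     )
--
-- def _contains(outer: str, inner: str) -> bool:
--     """True when ``outer`` contains ``inner`` by hierarchical glob rules.
--
--     A ``*`` glob contains everything. A ``<prefix>:*`` glob contains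
--     ``<prefix>`` itself and any ``<prefix>:...`` descendant. Equal
--     strings contain each other.
--     """
--     if outer == "*":
--         return True
--     if outer == inner:
--         return True
--     if outer.endswith(":*"):
--         prefix = outer[:-2]
--         return inner == prefix or inner.startswith(prefix + ":")
--     return False
-- ===== SOURCE B (Python) =====
-- def match_scope(entity_scopes, allowed_scopes):
--     if not entity_scopes or not allowed_scopes:
--         return True
--     ents = set(entity_scopes)
--     alls = set(allowed_scopes)
--     if "*" in ents or "*" in alls:
--         return True
--     if not ents.isdisjoint(alls):
--         return True
--     ent_globs = {s[:-2] for s in ents if s.endswith(":*")}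
--     all_globs = {s[:-2] for s in alls if s.endswith(":*")}
--     ent_anc = set()
--     for s in ents:
--         ent_anc |= _ancestors(s)
--     all_anc = set()
--     for s in alls:
--         all_anc |= _ancestors(s)
--     return not ent_globs.isdisjoint(all_anc) or not all_globs.isdisjoint(ent_anc)
--
-- def _ancestors(s):
--     out = {s}
--     for i, c in enumerate(s):
--         if c == ":":
--             out.add(s[:i])
--     return out
-- ===== Notes on version B (the rewrite author's own statement) =====
-- stated objective: alternative
-- what changed: Replaced the nested all-pairs glob comparison with set indexing: exact overlap via set intersection, '*' via membership, and glob-prefix containment via a precomputed set of ':'-boundary ancestor prefixes of each side, so no pair of scopes is ever compared directly; it trades per-pair short-circuiting for one-pass index construction.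
import Mathlib
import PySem

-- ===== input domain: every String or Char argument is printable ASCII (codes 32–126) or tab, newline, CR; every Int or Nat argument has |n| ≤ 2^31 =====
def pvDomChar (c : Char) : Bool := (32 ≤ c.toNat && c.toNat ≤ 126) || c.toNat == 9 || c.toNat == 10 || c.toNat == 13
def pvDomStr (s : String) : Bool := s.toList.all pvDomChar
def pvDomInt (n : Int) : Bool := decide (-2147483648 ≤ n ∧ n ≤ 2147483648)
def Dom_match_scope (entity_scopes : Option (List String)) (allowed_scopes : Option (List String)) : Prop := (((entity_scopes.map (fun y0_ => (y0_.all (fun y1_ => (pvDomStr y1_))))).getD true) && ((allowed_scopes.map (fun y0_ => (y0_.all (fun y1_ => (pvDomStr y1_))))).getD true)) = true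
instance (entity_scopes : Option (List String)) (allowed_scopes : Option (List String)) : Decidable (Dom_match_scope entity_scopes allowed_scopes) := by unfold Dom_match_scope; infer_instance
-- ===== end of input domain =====

-- B replaces A's nested all-pairs glob comparison with set indexing (exact overlap by
-- set intersection, glob containment via precomputed ':'-ancestor-prefix sets).


-- ===== PORT A =====
def pyContains (outer inner : String) : Bool :=
  if outer = "*" then true
  else if outer = inner then true
  else if PySem.Str.endswith outer ":*" then
    let pre := PySem.Str.slice outer none (some (-2))
    (inner = pre || PySem.Str.startswith inner (pre ++ ":"))
  else false

def match_scope (entity_scopes : Option (List String)) (allowed_scopes : Option (List String)) : Bool :=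
  if (entity_scopes.getD []).isEmpty then true
  else if (allowed_scopes.getD []).isEmpty then true
  else (entity_scopes.getD []).any (fun e =>
        (allowed_scopes.getD []).any (fun a => pyContains e a || pyContains a e))

-- ===== PORT B =====
-- out = {s}; for i, c in enumerate(s): if c == ':': out.add(s[:i])
def ancSet (s : String) : PySem.Set String :=
  (PySem.List.enumerate s.toList 0).foldl
    (fun out ic => if ic.2 = ':' then PySem.Set.add out (PySem.Str.slice s none (some ic.1)) else out)
    (PySem.Set.ofList [s])

def globPrefixes (l : PySem.Set String) : PySem.Set String :=
  PySem.Set.ofList ((l.filter (fun t => PySem.Str.endswith t ":*")).map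
    (fun t => PySem.Str.slice t none (some (-2))))

def ancUnion (l : PySem.Set String) : PySem.Set String :=
  l.foldl (fun acc t => PySem.Set.union acc (ancSet t)) PySem.Set.empty

def altCore (ents alls : PySem.Set String) : Bool :=
  if PySem.Set.contains ents "*" || PySem.Set.contains alls "*" then true
  else if !PySem.Set.isdisjoint ents alls then true
  else
    (!PySem.Set.isdisjoint (globPrefixes ents) (ancUnion alls)
     || !PySem.Set.isdisjoint (globPrefixes alls) (ancUnion ents))

def match_scope_alt (entity_scopes : Option (List String)) (allowed_scopes : Option (List String)) : Bool :=
  if (entity_scopes.getD []).isEmpty || (allowed_scopes.getD []).isEmpty then true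
  else altCore (PySem.Set.ofList (entity_scopes.getD []))
               (PySem.Set.ofList (allowed_scopes.getD []))

-- ===== PRECONDITION & SPEC =====
def Spec_match_scope (entity_scopes : Option (List String)) (allowed_scopes : Option (List String)) (out : Bool) : Prop := out = match_scope_alt entity_scopes allowed_scopes
instance (entity_scopes : Option (List String)) (allowed_scopes : Option (List String)) (out : Bool) : Decidable (Spec_match_scope entity_scopes allowed_scopes out) := by unfold Spec_match_scope; infer_instance

-- ===== CLAIM (what is proved, stated in full; the proofs are below) =====
def Claim_equal_match_scope : Prop := ∀ (entity_scopes : Option (List String)) (allowed_scopes : Option (List String)), Dom_match_scope entity_scopes allowed_scopes → Spec_match_scope entity_scopes allowed_scopes (match_scope entity_scopes allowed_scopes)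

-- ===== LEMMAS AND PROOFS =====

theorem mem_foldl_add_if {α β : Type} [BEq α] [LawfulBEq α] (l : List β) (p : β → Prop)
    [DecidablePred p] (f : β → α) (s0 : PySem.Set α) (x : α) :
    x ∈ l.foldl (fun acc y => if p y then PySem.Set.add acc (f y) else acc) s0 ↔
      x ∈ s0 ∨ ∃ y ∈ l, p y ∧ x = f y := by
  induction l generalizing s0 with
  | nil => simp
  | cons y l ih =>
    rw [List.foldl_cons, ih]
    constructor
    · rintro (hx | ⟨y', hy', hp', rfl⟩)
      · by_cases h : p y
        · rw [if_pos h, PySem.Set.mem_add] at hx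
          rcases hx with hx | rfl
          · exact Or.inl hx
          · exact Or.inr ⟨y, List.mem_cons_self .., h, rfl⟩
        · rw [if_neg h] at hx; exact Or.inl hx
      · exact Or.inr ⟨y', List.mem_cons_of_mem _ hy', hp', rfl⟩
    · rintro (hx | ⟨y', hy', hp', rfl⟩)
      · left
        by_cases h : p y
        · rw [if_pos h, PySem.Set.mem_add]; exact Or.inl hx
        · rw [if_neg h]; exact hx
      · rcases List.mem_cons.1 hy' with rfl | hy''
        · left; rw [if_pos hp', PySem.Set.mem_add]; exact Or.inr rfl
        · exact Or.inr ⟨y', hy'', hp', rfl⟩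

theorem mem_foldl_union {α β : Type} [BEq α] [LawfulBEq α] (l : List β)
    (f : β → PySem.Set α) (s0 : PySem.Set α) (x : α) :
    x ∈ l.foldl (fun acc y => PySem.Set.union acc (f y)) s0 ↔
      x ∈ s0 ∨ ∃ y ∈ l, x ∈ f y := by
  induction l generalizing s0 with
  | nil => simp
  | cons y l ih =>
    rw [List.foldl_cons, ih]
    simp only [PySem.Set.mem_union, List.mem_cons]
    constructor
    · rintro ((h | h) | ⟨y', hy', h⟩)
      · exact Or.inl h
      · exact Or.inr ⟨y, Or.inl rfl, h⟩
      · exact Or.inr ⟨y', Or.inr hy', h⟩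
    · rintro (h | ⟨y', rfl | hy', h⟩)
      · exact Or.inl (Or.inl h)
      · exact Or.inl (Or.inr h)
      · exact Or.inr ⟨y', hy', h⟩

theorem prefix_colon_iff (p a : List Char) :
    (p ++ [':']) <+: a ↔ ∃ (k : Nat) (h : k < a.length), a[k] = ':' ∧ p = a.take k := by
  constructor
  · rintro ⟨t, rfl⟩
    rw [List.append_assoc, List.singleton_append]
    refine ⟨p.length, by simp, ?_, ?_⟩
    · rw [List.getElem_append_right (Nat.le_refl _)]
      simp
    · simp
  · rintro ⟨k, hk, hc, rfl⟩
    refine ⟨a.drop (k + 1), ?_⟩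
    rw [List.append_assoc, List.singleton_append]
    rw [← hc]
    rw [List.getElem_cons_drop hk]
    exact List.take_append_drop k a

theorem mem_ancSet (x s : String) :
    x ∈ ancSet s ↔ x = s ∨ (x.toList ++ [':']) <+: s.toList := by
  unfold ancSet
  rw [mem_foldl_add_if, prefix_colon_iff]
  simp only [PySem.Set.mem_ofList, List.mem_singleton]
  constructor
  · rintro (h | ⟨y, hy, hc, rfl⟩)
    · exact Or.inl h
    · right
      rw [PySem.List.mem_enumerate_iff] at hy
      obtain ⟨k, hk, rfl⟩ := hy
      refine ⟨k, hk, hc, ?_⟩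
      rw [PySem.Str.toList_slice]
      simp [PySem.Chars.slice_eq_listSlice, PySem.List.slice_to_natCast]
  · rintro (h | ⟨k, hk, hc, hp⟩)
    · exact Or.inl h
    · right
      refine ⟨((0 : Int) + (k : Nat), s.toList[k]), ?_, hc, ?_⟩
      · rw [PySem.List.mem_enumerate_iff]; exact ⟨k, hk, rfl⟩
      · apply String.toList_inj.mp
        rw [PySem.Str.toList_slice]
        simp [PySem.Chars.slice_eq_listSlice, PySem.List.slice_to_natCast, hp]

theorem pyContains_self (x : String) : pyContains x x = true := by
  unfold pyContains; split_ifs <;> simp_all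

theorem pyContains_star (i : String) : pyContains "*" i = true := by
  unfold pyContains; rw [if_pos rfl]

theorem pyContains_iff (o i : String) :
    pyContains o i = true ↔
      o = "*" ∨ o = i ∨ (PySem.Str.endswith o ":*" = true ∧
        PySem.Str.slice o none (some (-2)) ∈ ancSet i) := by
  unfold pyContains
  rw [mem_ancSet]
  split_ifs with h1 h2 h3
  · simp [h1]
  · simp [h2]
  · simp only [h1, h2, h3, false_or, true_and, Bool.or_eq_true, decide_eq_true_eq,
      PySem.Str.startswith_eq, PySem.Chars.startswith_iff, String.toList_append]
    constructor <;> rintro (h | h)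
    · exact Or.inl h.symm
    · right; simpa using h
    · exact Or.inl h.symm
    · right; simpa using h
  · constructor
    · intro h; exact absurd h (by simp)
    · rintro (h | h | ⟨hg, _⟩)
      · exact absurd h h1
      · exact absurd h h2
      · exact absurd hg h3

theorem set_contains_iff (s : PySem.Set String) (x : String) :
    PySem.Set.contains s x = true ↔ x ∈ s := by
  simp [PySem.Set.contains]

theorem mem_globPrefixes (x : String) (l : PySem.Set String) :
    x ∈ globPrefixes l ↔
      ∃ t ∈ l, PySem.Str.endswith t ":*" = true ∧ x = PySem.Str.slice t none (some (-2)) := by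
  unfold globPrefixes
  rw [PySem.Set.mem_ofList]
  constructor
  · intro h
    obtain ⟨t, ht, rfl⟩ := List.mem_map.mp h
    obtain ⟨htl, hts⟩ := List.mem_filter.mp ht
    exact ⟨t, htl, hts, rfl⟩
  · rintro ⟨t, htl, hts, rfl⟩
    exact List.mem_map.mpr ⟨t, List.mem_filter.mpr ⟨htl, hts⟩, rfl⟩

theorem mem_ancUnion (x : String) (l : PySem.Set String) :
    x ∈ ancUnion l ↔ ∃ t ∈ l, x ∈ ancSet t := by
  unfold ancUnion
  rw [mem_foldl_union]
  simp [PySem.Set.empty]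

theorem not_isdisjoint_iff (s t : PySem.Set String) :
    (!PySem.Set.isdisjoint s t) = true ↔ ∃ x ∈ s, x ∈ t := by
  constructor
  · intro h
    by_contra hno
    push Not at hno
    have hd : PySem.Set.isdisjoint s t = true :=
      (PySem.Set.isdisjoint_iff s t).mpr hno
    simp [hd] at h
  · rintro ⟨x, hxs, hxt⟩
    by_contra h
    have h' : PySem.Set.isdisjoint s t = true := by simpa using h
    exact ((PySem.Set.isdisjoint_iff s t).mp h' x hxs) hxt

theorem mem_ofList_iff {α : Type} [BEq α] [LawfulBEq α] {x : α} {l : List α} :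
    x ∈ PySem.Set.ofList l ↔ x ∈ l := by
  simp [PySem.Set.mem_ofList]

-- ===== VERDICT (by name: the statement is the Claim_ definition above) =====
theorem match_scope_spec : Claim_equal_match_scope := by
  intro es as _
  unfold Spec_match_scope match_scope match_scope_alt
  by_cases h1 : (es.getD []).isEmpty
  · simp [h1]
  by_cases h2 : (as.getD []).isEmpty
  · simp [h2]
  rw [if_neg h1, if_neg h2, if_neg (by simp [h1, h2])]
  unfold altCore
  have hel : es.getD [] ≠ [] := fun h => h1 (by simp [h])
  have hal : as.getD [] ≠ [] := fun h => h2 (by simp [h])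
  obtain ⟨e0, he0⟩ := List.exists_mem_of_ne_nil _ hel
  obtain ⟨a0, ha0⟩ := List.exists_mem_of_ne_nil _ hal
  split_ifs with hstar hint
  · -- a "*" scope is present on one side
    rcases (by simpa using hstar :
        PySem.Set.contains (PySem.Set.ofList (es.getD [])) "*" = true ∨
        PySem.Set.contains (PySem.Set.ofList (as.getD [])) "*" = true) with h | h
    · have hm : "*" ∈ es.getD [] := mem_ofList_iff.mp ((set_contains_iff _ _).mp h)
      refine List.any_eq_true.mpr ⟨"*", hm, List.any_eq_true.mpr ⟨a0, ha0, ?_⟩⟩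
      simp [pyContains_star a0]
    · have hm : "*" ∈ as.getD [] := mem_ofList_iff.mp ((set_contains_iff _ _).mp h)
      refine List.any_eq_true.mpr ⟨e0, he0, List.any_eq_true.mpr ⟨"*", hm, ?_⟩⟩
      simp [pyContains_star e0]
  · -- an exact scope is shared
    obtain ⟨x, hx1, hx2⟩ := (not_isdisjoint_iff _ _).mp hint
    refine List.any_eq_true.mpr ⟨x, mem_ofList_iff.mp hx1,
      List.any_eq_true.mpr ⟨x, mem_ofList_iff.mp hx2, ?_⟩⟩
    simp [pyContains_self x]
  · -- no "*", disjoint sides: only glob-prefix containment can fire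
    have hstarE : "*" ∉ es.getD [] := fun hm => hstar (by simp; exact Or.inl hm)
    have hstarA : "*" ∉ as.getD [] := fun hm => hstar (by simp; exact Or.inr hm)
    have hdisj : ∀ x ∈ es.getD [], x ∉ as.getD [] := by
      intro x hx hx2
      have hd : PySem.Set.isdisjoint (PySem.Set.ofList (es.getD []))
          (PySem.Set.ofList (as.getD [])) = true := by simpa using hint
      exact ((PySem.Set.isdisjoint_iff _ _).mp hd x (mem_ofList_iff.mpr hx))
        (mem_ofList_iff.mpr hx2)
    apply Bool.eq_iff_iff.mpr
    simp only [List.any_eq_true, Bool.or_eq_true, not_isdisjoint_iff,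
      mem_globPrefixes, mem_ancUnion, mem_ofList_iff]
    constructor
    · rintro ⟨e, he, a, ha, hc | hc⟩
      · rcases (pyContains_iff e a).mp hc with rfl | rfl | ⟨hg, hanc⟩
        · exact absurd he hstarE
        · exact absurd ha (hdisj _ he)
        · exact Or.inl ⟨_, ⟨e, he, hg, rfl⟩, ⟨a, ha, hanc⟩⟩
      · rcases (pyContains_iff a e).mp hc with rfl | rfl | ⟨hg, hanc⟩
        · exact absurd ha hstarA
        · exact absurd ha (hdisj _ he)
        · exact Or.inr ⟨_, ⟨a, ha, hg, rfl⟩, ⟨e, he, hanc⟩⟩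
    · rintro (⟨x, ⟨e, he, hg, rfl⟩, ⟨a, ha, hanc⟩⟩ | ⟨x, ⟨a, ha, hg, rfl⟩, ⟨e, he, hanc⟩⟩)
      · exact ⟨e, he, a, ha, Or.inl ((pyContains_iff e a).mpr (Or.inr (Or.inr ⟨hg, hanc⟩)))⟩
      · exact ⟨e, he, a, ha, Or.inr ((pyContains_iff a e).mpr (Or.inr (Or.inr ⟨hg, hanc⟩)))⟩
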